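-- pv_equiv track=rewrite | github.com/karfly/bizzbazz | bizzbazz_functions.py | is_divided_by_3
-- ===== SOURCE A (Python) =====
-- def is_divided_by_3(n_str) : # Note, that this function gets a string as an argument (to work with big numbers)
--
--         if (n_str[0] == '+' or n_str[0] == '-') :
--                 n_str = n_str[1:]
--
--         if (len(n_str) == 1) : # End of recursion
--                 if ((n_str == '0') or (n_str == '3') or (n_str == '6') or (n_str == '9')) :
--                         return True
--                 else :
--                         return False
--
--         sum = 0
--         for char in n_str :
--                 sum += int(char)
--
--         return is_divided_by_3(str(sum))
-- ===== SOURCE B (Python) =====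
-- def is_divided_by_3(n_str):  # string argument, works with big numbers
--     if n_str[0] in '+-':
--         n_str = n_str[1:]
--     if len(n_str) == 1:  # keep A's single-character answer (no exception on a non-digit)
--         return n_str in ('0', '3', '6', '9')
--     return sum(int(c) for c in n_str) % 3 == 0
-- ===== Notes on version B (the rewrite author's own statement) =====
-- stated objective: simpler
-- what changed: replaces A's recursive digital-root descent (repeatedly summing digits of str(sum) until one digit remains) with a single digit-sum pass followed by one mod-3 test
import Mathlib
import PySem

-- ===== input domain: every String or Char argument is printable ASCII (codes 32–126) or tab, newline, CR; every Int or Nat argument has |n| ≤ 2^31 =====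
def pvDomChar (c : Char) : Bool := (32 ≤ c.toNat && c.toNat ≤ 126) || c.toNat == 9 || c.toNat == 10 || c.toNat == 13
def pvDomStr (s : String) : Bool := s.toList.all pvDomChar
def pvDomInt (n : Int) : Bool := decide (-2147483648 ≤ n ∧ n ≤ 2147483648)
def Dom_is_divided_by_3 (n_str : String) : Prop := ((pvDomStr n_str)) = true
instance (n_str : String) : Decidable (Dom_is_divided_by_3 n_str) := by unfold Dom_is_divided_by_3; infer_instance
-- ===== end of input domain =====

-- B replaces A's recursive digital-root descent by a single digit-sum pass and one mod-3 test (objective: simpler).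

-- ===== PORT A =====
-- sum = 0; for char in n_str: sum += int(char)   (none = ValueError from int(char))
def pySumDigits? (l : List Char) : Option Int :=
  l.foldl (fun acc c => acc.bind fun a => (PySem.Int.ofChars? [c]).map fun v => a + v) (some 0)

-- A's recursion, with a fuel guard that only makes the same computation total
def aLoop : Nat → List Char → Bool
  | 0, _ => false
  | fuel+1, l =>
    match l with
    | [] => false     -- n_str[0] : IndexError
    | c :: rest =>
      let l' := if c = '+' ∨ c = '-' then rest else c :: rest
      if l'.length = 1 then
        (l' == ['0']) || (l' == ['3']) || (l' == ['6']) || (l' == ['9'])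
      else
        match pySumDigits? l' with
        | none => false   -- int(char) : ValueError
        | some s => aLoop fuel (PySem.Int.toChars s)

def is_divided_by_3 (n_str : String) : Bool :=
  aLoop (9 * n_str.toList.length + 10) n_str.toList

-- ===== PORT B =====
def is_divided_by_3_alt (n_str : String) : Bool :=
  let s := match n_str.toList with
    | c :: rest => if c = '+' ∨ c = '-' then rest else c :: rest
    | [] => []
  if s.length = 1 then
    (s == ['0']) || (s == ['3']) || (s == ['6']) || (s == ['9'])
  else
    match s.mapM (fun c => PySem.Int.ofChars? [c]) with
    | none => false   -- int(c) : ValueError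
    | some ds => PySem.Int.mod ds.sum 3 == 0

-- ===== PRECONDITION & SPEC =====
def pvStrip (l : List Char) : List Char :=
  match l with
  | c :: rest => if c = '+' ∨ c = '-' then rest else c :: rest
  | [] => []

-- Pre_ = exactly where A returns: nonempty, and after stripping one sign either a single
-- character (any) or all digits (otherwise int(char) raises ValueError; empty raises IndexError).
def Pre_is_divided_by_3 (n_str : String) : Prop :=
  n_str.toList ≠ [] ∧
    ((pvStrip n_str.toList).length = 1 ∨ (pvStrip n_str.toList).all Char.isDigit = true)
instance (n_str : String) : Decidable (Pre_is_divided_by_3 n_str) := by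
  unfold Pre_is_divided_by_3; infer_instance

def pvWitness_is_divided_by_3 : String := "12"

def Spec_is_divided_by_3 (n_str : String) (out : Bool) : Prop := out = is_divided_by_3_alt n_str
instance (n_str : String) (out : Bool) : Decidable (Spec_is_divided_by_3 n_str out) := by
  unfold Spec_is_divided_by_3; infer_instance

-- ===== CLAIM (what is proved, stated in full; the proofs are below) =====
def Claim_equal_is_divided_by_3 : Prop := ∀ (n_str : String), Dom_is_divided_by_3 n_str → Pre_is_divided_by_3 n_str → Spec_is_divided_by_3 n_str (is_divided_by_3 n_str)

-- ===== LEMMAS AND PROOFS =====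
theorem char_toNat_inj (a b : Char) (h : a.toNat = b.toNat) : a = b :=
  Char.ext (UInt32.toNat_inj.mp h)

theorem digit_char_enum (c : Char) (h : c.isDigit = true) :
    c = '0' ∨ c = '1' ∨ c = '2' ∨ c = '3' ∨ c = '4' ∨
    c = '5' ∨ c = '6' ∨ c = '7' ∨ c = '8' ∨ c = '9' := by
  simp only [Char.isDigit, Bool.and_eq_true, decide_eq_true_eq] at h
  obtain ⟨h1, h2⟩ := h
  have h1' : 48 ≤ c.toNat := h1
  have h2' : c.toNat ≤ 57 := h2
  have hd : c.toNat = 48 ∨ c.toNat = 49 ∨ c.toNat = 50 ∨ c.toNat = 51 ∨ c.toNat = 52 ∨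
      c.toNat = 53 ∨ c.toNat = 54 ∨ c.toNat = 55 ∨ c.toNat = 56 ∨ c.toNat = 57 := by omega
  rcases hd with h|h|h|h|h|h|h|h|h|h
  · exact Or.inl (char_toNat_inj _ _ h)
  · exact Or.inr (Or.inl (char_toNat_inj _ _ h))
  · exact Or.inr (Or.inr (Or.inl (char_toNat_inj _ _ h)))
  · exact Or.inr (Or.inr (Or.inr (Or.inl (char_toNat_inj _ _ h))))
  · exact Or.inr (Or.inr (Or.inr (Or.inr (Or.inl (char_toNat_inj _ _ h)))))
  · exact Or.inr (Or.inr (Or.inr (Or.inr (Or.inr (Or.inl (char_toNat_inj _ _ h))))))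
  · exact Or.inr (Or.inr (Or.inr (Or.inr (Or.inr (Or.inr (Or.inl (char_toNat_inj _ _ h)))))))
  · exact Or.inr (Or.inr (Or.inr (Or.inr (Or.inr (Or.inr (Or.inr (Or.inl (char_toNat_inj _ _ h))))))))
  · exact Or.inr (Or.inr (Or.inr (Or.inr (Or.inr (Or.inr (Or.inr (Or.inr (Or.inl (char_toNat_inj _ _ h)))))))))
  · exact Or.inr (Or.inr (Or.inr (Or.inr (Or.inr (Or.inr (Or.inr (Or.inr (Or.inr (char_toNat_inj _ _ h)))))))))

theorem ofChars_digit (c : Char) (h : c.isDigit = true) :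
    PySem.Int.ofChars? [c] = some ((c.toNat : Int) - 48) := by
  rcases digit_char_enum c h with h|h|h|h|h|h|h|h|h|h <;> subst h <;> decide

theorem digit_not_sign (c : Char) (h : c.isDigit = true) : ¬ (c = '+' ∨ c = '-') := by
  rcases digit_char_enum c h with h|h|h|h|h|h|h|h|h|h <;> subst h <;> decide

-- Nat-valued digit sum of a digit string
def dsum (l : List Char) : Nat := (l.map (fun c => c.toNat - 48)).sum

theorem dsum_le (l : List Char) (h : l.all Char.isDigit = true) : dsum l ≤ 9 * l.length := by
  induction l with
  | nil => simp [dsum]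
  | cons c t ih =>
    simp only [List.all_cons, Bool.and_eq_true] at h
    have h2 : c.toNat ≤ 57 := by
      have := h.1
      simp only [Char.isDigit, Bool.and_eq_true, decide_eq_true_eq] at this
      exact this.2
    have := ih h.2
    simp only [dsum, List.map_cons, List.sum_cons, List.length_cons] at *
    omega

theorem pySumDigits_aux (l : List Char) (h : l.all Char.isDigit = true) (a : Int) :
    l.foldl (fun acc c => acc.bind fun a => (PySem.Int.ofChars? [c]).map fun v => a + v)
      (some a) = some (a + dsum l) := by
  induction l generalizing a with
  | nil => simp [dsum]
  | cons c t ih =>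
    simp only [List.all_cons, Bool.and_eq_true] at h
    have h48 : 48 ≤ c.toNat := by
      have := h.1
      simp only [Char.isDigit, Bool.and_eq_true, decide_eq_true_eq] at this
      exact this.1
    simp only [List.foldl_cons, ofChars_digit c h.1, Option.bind_some, Option.map_some,
      ih h.2, dsum, List.map_cons, List.sum_cons]
    congr 1
    push_cast
    omega

theorem pySumDigits_eq (l : List Char) (h : l.all Char.isDigit = true) :
    pySumDigits? l = some ((dsum l : Int)) := by
  simpa using pySumDigits_aux l h 0

theorem mapM_digits (l : List Char) (h : l.all Char.isDigit = true) :
    (l.mapM (fun c => PySem.Int.ofChars? [c])) = some (l.map fun c => (c.toNat : Int) - 48) := by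
  induction l with
  | nil => rfl
  | cons c t ih =>
    simp only [List.all_cons, Bool.and_eq_true] at h
    simp [List.mapM_cons, ofChars_digit c h.1, ih h.2]

theorem sum_map_digits (l : List Char) (h : l.all Char.isDigit = true) :
    (l.map fun c => (c.toNat : Int) - 48).sum = (dsum l : Int) := by
  induction l with
  | nil => simp [dsum]
  | cons c t ih =>
    simp only [List.all_cons, Bool.and_eq_true] at h
    have h48 : 48 ≤ c.toNat := by
      have := h.1
      simp only [Char.isDigit, Bool.and_eq_true, decide_eq_true_eq] at this
      exact this.1
    simp only [List.map_cons, List.sum_cons, ih h.2, dsum] at *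
    push_cast
    omega

theorem digitChar_isDigit (d : Nat) (h : d < 10) : (Nat.digitChar d).isDigit = true := by
  interval_cases d <;> decide

theorem digitChar_val (d : Nat) (h : d < 10) : (Nat.digitChar d).toNat - 48 = d := by
  interval_cases d <;> decide

theorem toDigitsCore_eq (fuel : Nat) : ∀ (n : Nat) (ds : List Char), 0 < n → n ≤ fuel →
    Nat.toDigitsCore 10 fuel n ds = ((Nat.digits 10 n).map Nat.digitChar).reverse ++ ds := by
  induction fuel with
  | zero => intro n ds h1 h2; omega
  | succ f ih =>
    intro n ds h1 h2
    rw [Nat.toDigitsCore]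
    by_cases hz : n / 10 = 0
    · rw [if_pos hz]
      rw [Nat.digits_def' (by norm_num : (1:Nat) < 10) h1, hz, Nat.digits_zero]
      simp
    · rw [if_neg hz]
      rw [ih (n / 10) _ (Nat.pos_of_ne_zero hz)
        (by have := Nat.div_lt_self h1 (by norm_num : (1:Nat) < 10); omega)]
      rw [Nat.digits_def' (by norm_num : (1:Nat) < 10) h1]
      simp

theorem toDigits_eq (n : Nat) :
    Nat.toDigits 10 n = if n = 0 then ['0'] else ((Nat.digits 10 n).map Nat.digitChar).reverse := by
  by_cases h : n = 0
  · subst h; decide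
  · rw [if_neg h, Nat.toDigits]
    simpa using toDigitsCore_eq (n + 1) n [] (Nat.pos_of_ne_zero h) (by omega)

theorem toDigits_all_digits (n : Nat) : (Nat.toDigits 10 n).all Char.isDigit = true := by
  rw [toDigits_eq]
  by_cases h : n = 0
  · subst h; decide
  · rw [if_neg h]
    simp only [List.all_reverse, List.all_map, List.all_eq_true]
    intro d hd
    exact digitChar_isDigit d (Nat.digits_lt_base (by norm_num) hd)

theorem dsum_toDigits (n : Nat) : dsum (Nat.toDigits 10 n) = (Nat.digits 10 n).sum := by
  rw [toDigits_eq]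
  by_cases h : n = 0
  · subst h; decide
  · rw [if_neg h]
    unfold dsum
    rw [List.map_reverse, List.sum_reverse, List.map_map]
    congr 1
    conv_rhs => rw [← List.map_id (Nat.digits 10 n)]
    apply List.map_congr_left
    intro d hd
    exact digitChar_val d (Nat.digits_lt_base (by norm_num) hd)

theorem toDigits_small (n : Nat) (h : n < 10) : Nat.toDigits 10 n = [Nat.digitChar n] := by
  rw [toDigits_eq]
  by_cases h0 : n = 0
  · subst h0; decide
  · rw [if_neg h0, Nat.digits_def' (by norm_num : (1:Nat) < 10) (Nat.pos_of_ne_zero h0),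
      Nat.div_eq_of_lt h, Nat.digits_zero, Nat.mod_eq_of_lt h]
    rfl

theorem toDigits_len_big (n : Nat) (h : 10 ≤ n) : 2 ≤ (Nat.toDigits 10 n).length := by
  rw [toDigits_eq, if_neg (by omega)]
  rw [List.length_reverse, List.length_map]
  rw [Nat.digits_def' (by norm_num : (1:Nat) < 10) (by omega)]
  have : Nat.digits 10 (n / 10) ≠ [] :=
    Nat.digits_ne_nil_iff_ne_zero.mpr (by omega)
  cases hx : Nat.digits 10 (n / 10) with
  | nil => exact absurd hx this
  | cons a t => simp

theorem digits_sum_lt (n : Nat) (h : 10 ≤ n) : (Nat.digits 10 n).sum < n := by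
  rw [Nat.digits_def' (by norm_num : (1:Nat) < 10) (by omega)]
  have h1 := Nat.digit_sum_le 10 (n / 10)
  have h2 := Nat.div_add_mod n 10
  have h3 : 0 < n / 10 := by omega
  simp only [List.sum_cons]
  omega

theorem digits_sum_mod3 (n : Nat) : (Nat.digits 10 n).sum % 3 = n % 3 :=
  (Nat.modEq_three_digits_sum n).symm

theorem toChars_natCast (m : Nat) : PySem.Int.toChars (m : Int) = Nat.toDigits 10 m := by
  simp [PySem.Int.toChars]

-- the heart: A's recursion on the decimal representation of m computes m % 3 == 0
theorem aLoop_toChars (m : Nat) : ∀ fuel, m < fuel →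
    aLoop fuel (PySem.Int.toChars (m : Int)) = decide (m % 3 = 0) := by
  induction m using Nat.strong_induction_on with
  | _ m IH =>
    intro fuel hf
    obtain ⟨f, rfl⟩ : ∃ f, fuel = f + 1 := ⟨fuel - 1, by omega⟩
    rw [toChars_natCast]
    by_cases hm : m < 10
    · rw [toDigits_small m hm]
      interval_cases m <;>
        simp only [show Nat.digitChar 0 = '0' from rfl, show Nat.digitChar 1 = '1' from rfl,
          show Nat.digitChar 2 = '2' from rfl, show Nat.digitChar 3 = '3' from rfl,
          show Nat.digitChar 4 = '4' from rfl, show Nat.digitChar 5 = '5' from rfl,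
          show Nat.digitChar 6 = '6' from rfl, show Nat.digitChar 7 = '7' from rfl,
          show Nat.digitChar 8 = '8' from rfl, show Nat.digitChar 9 = '9' from rfl] <;>
        simp [aLoop]
    · have hall := toDigits_all_digits m
      cases hl : Nat.toDigits 10 m with
      | nil => exact absurd (hl ▸ toDigits_len_big m (by omega)) (by simp)
      | cons c rest =>
        have hlen := toDigits_len_big m (by omega)
        rw [hl] at hall hlen
        have hcdig : c.isDigit = true := by
          simp only [List.all_cons, Bool.and_eq_true] at hall
          exact hall.1
        rw [aLoop]
        simp only [digit_not_sign c hcdig, ite_false]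
        have hne1 : ¬((c :: rest).length = 1) := by
          simp only [List.length_cons] at hlen ⊢; omega
        rw [if_neg hne1]
        rw [pySumDigits_eq (c :: rest) hall]
        have hds : dsum (c :: rest) = (Nat.digits 10 m).sum := by
          rw [← hl]; exact dsum_toDigits m
        rw [hds]
        have hlt := digits_sum_lt m (by omega)
        show aLoop f (PySem.Int.toChars ((Nat.digits 10 m).sum : Int)) = decide (m % 3 = 0)
        rw [IH _ hlt f (by omega)]
        rw [digits_sum_mod3]

theorem mod3_beq (d : Nat) : (PySem.Int.mod (d : Int) 3 == 0) = decide (d % 3 = 0) := by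
  have h : PySem.Int.mod (d : Int) 3 = ((d % 3 : Nat) : Int) := by
    exact_mod_cast PySem.Int.mod_natCast d 3
  rw [h]
  have : d % 3 = 0 ∨ d % 3 = 1 ∨ d % 3 = 2 := by omega
  rcases this with h3|h3|h3 <;> rw [h3] <;> decide

theorem main_branch (f : Nat) (l' : List Char)
    (h : l'.length = 1 ∨ l'.all Char.isDigit = true) (hb : 9 * l'.length + 9 ≤ f) :
    (if l'.length = 1 then (l' == ['0'] || l' == ['3'] || l' == ['6'] || l' == ['9'])
     else match pySumDigits? l' with
          | none => false
          | some s => aLoop f (PySem.Int.toChars s)) =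
    (if l'.length = 1 then (l' == ['0'] || l' == ['3'] || l' == ['6'] || l' == ['9'])
     else match l'.mapM (fun c => PySem.Int.ofChars? [c]) with
          | none => false
          | some ds => PySem.Int.mod ds.sum 3 == 0) := by
  by_cases hlen : l'.length = 1
  · rw [if_pos hlen, if_pos hlen]
  · rw [if_neg hlen, if_neg hlen]
    have hall : l'.all Char.isDigit = true := h.resolve_left hlen
    rw [pySumDigits_eq l' hall, mapM_digits l' hall]
    show aLoop f (PySem.Int.toChars ((dsum l' : Int))) =
      ((PySem.Int.mod (l'.map fun c => (c.toNat : Int) - 48).sum 3) == 0)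
    rw [sum_map_digits l' hall]
    have hlt : dsum l' < f := by have := dsum_le l' hall; omega
    rw [aLoop_toChars (dsum l') f hlt, mod3_beq]

-- ===== VERDICT (by name: the statement is the Claim_ definition above) =====
theorem is_divided_by_3_spec : Claim_equal_is_divided_by_3 := by
  intro n_str _ hPre
  obtain ⟨hne, hPre2⟩ := hPre
  unfold Spec_is_divided_by_3 is_divided_by_3 is_divided_by_3_alt
  cases hl : n_str.toList with
  | nil => exact absurd hl hne
  | cons c rest =>
    rw [hl] at hPre2
    simp only [pvStrip] at hPre2
    obtain ⟨f, hfuel⟩ : ∃ f, 9 * (c :: rest).length + 10 = f + 1 :=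
      ⟨9 * (c :: rest).length + 9, by omega⟩
    rw [hfuel, aLoop]
    have hlb : (if c = '+' ∨ c = '-' then rest else c :: rest).length ≤ (c :: rest).length := by
      split <;> simp
    exact main_branch f _ hPre2 (by omega)
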